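-- pv_equiv track=rewrite | github.com/quanttraderkim/memguard | benchmarks/isb/run.py | fit_recent
-- ===== SOURCE A (Python) =====
-- from typing import Any, Dict, List
--
-- def estimate_tokens(text: str) -> int:
--     return max(len(text) // 4, 1)
--
-- def fit_recent(items: List[str], budget: int) -> List[str]:
--     selected: List[str] = []
--     used = 0
--     for item in reversed(items):
--         cost = estimate_tokens(item)
--         if selected and used + cost > budget:
--             break
--         selected.append(item)
--         used += cost
--     selected.reverse()
--     return selected
-- ===== SOURCE B (Python) =====
-- from typing import List
--
-- def estimate_tokens(text: str) -> int:
--     return max(len(text) // 4, 1)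
--
-- def fit_recent(items: List[str], budget: int) -> List[str]:
--     used = sum(estimate_tokens(x) for x in items)
--     start = 0
--     while start < len(items) - 1 and used > budget:
--         used -= estimate_tokens(items[start])
--         start += 1
--     return items[start:]
-- ===== Notes on version B (the rewrite author's own statement) =====
-- stated objective: alternative
-- what changed: B computes the grand total cost in one pass and trims items from the FRONT, decrementing the total until the remaining suffix fits, instead of A's back-to-front accumulation with a break and a final reverse.
import Mathlib
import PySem

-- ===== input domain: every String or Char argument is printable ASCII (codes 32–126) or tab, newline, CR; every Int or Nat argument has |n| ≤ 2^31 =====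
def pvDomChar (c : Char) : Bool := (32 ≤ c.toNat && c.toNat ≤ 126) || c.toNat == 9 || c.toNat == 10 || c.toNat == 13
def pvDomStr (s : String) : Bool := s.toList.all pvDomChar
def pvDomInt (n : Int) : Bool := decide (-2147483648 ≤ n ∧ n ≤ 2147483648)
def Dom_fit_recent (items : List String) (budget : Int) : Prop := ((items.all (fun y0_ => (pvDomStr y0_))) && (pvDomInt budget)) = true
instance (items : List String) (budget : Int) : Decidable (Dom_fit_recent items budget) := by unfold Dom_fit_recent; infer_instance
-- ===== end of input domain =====

-- B trims from the front of a one-pass grand total instead of A's back-to-front accumulation with break+reverse; same cost, alternative decomposition.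

-- ===== PORT A =====
def estimate_tokens (text : String) : Int :=
  max (PySem.Int.floordiv (PySem.Str.len text) 4) 1

-- A's loop over reversed(items), state (selected, used), break when selected nonempty and over budget
def fitA_loop (budget : Int) : List String → List String → Int → List String
  | [], selected, _ => selected
  | item :: rest, selected, used =>
    let cost := estimate_tokens item
    if selected ≠ [] ∧ used + cost > budget then selected
    else fitA_loop budget rest (selected ++ [item]) (used + cost)

def fit_recent (items : List String) (budget : Int) : List String :=
  (fitA_loop budget items.reverse [] 0).reverse

-- ===== PORT B =====
-- B: total cost in one pass, then drop from the front while over budget and more than one item remains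
def fitB_loop (budget : Int) : List String → Int → List String
  | [], _ => []
  | [x], _ => [x]
  | x :: rest, used =>
    if used > budget then fitB_loop budget rest (used - estimate_tokens x)
    else x :: rest

def fit_recent_alt (items : List String) (budget : Int) : List String :=
  let used := items.foldl (fun a x => a + estimate_tokens x) 0
  fitB_loop budget items used

-- ===== PRECONDITION & SPEC =====
def Spec_fit_recent (items : List String) (budget : Int) (out : List String) : Prop := out = fit_recent_alt items budget
instance (items : List String) (budget : Int) (out : List String) : Decidable (Spec_fit_recent items budget out) := by unfold Spec_fit_recent; infer_instance

-- ===== CLAIM (what is proved, stated in full; the proofs are below) =====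
def Claim_equal_fit_recent : Prop := ∀ (items : List String) (budget : Int), Dom_fit_recent items budget → Spec_fit_recent items budget (fit_recent items budget)

-- ===== LEMMAS AND PROOFS =====

-- the inner part of A's loop once selected is nonempty (pure take-while, break on over-budget)
def takeW (budget : Int) : List String → Int → List String
  | [], _ => []
  | x :: r, u =>
    if u + estimate_tokens x > budget then []
    else x :: takeW budget r (u + estimate_tokens x)

def sumE (l : List String) : Int := (l.map estimate_tokens).sum

theorem est_pos (x : String) : 1 ≤ estimate_tokens x := le_max_right _ _

theorem sumE_nonneg (l : List String) : 0 ≤ sumE l := by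
  induction l with
  | nil => simp [sumE]
  | cons x r ih =>
    have := est_pos x
    simp only [sumE, List.map_cons, List.sum_cons] at *
    omega

theorem sumE_cons (x : String) (l : List String) : sumE (x :: l) = estimate_tokens x + sumE l := by
  simp [sumE]

theorem sumE_reverse (l : List String) : sumE l.reverse = sumE l := by
  simp [sumE]

theorem foldl_sumE (l : List String) (a : Int) :
    l.foldl (fun a x => a + estimate_tokens x) a = a + sumE l := by
  induction l generalizing a with
  | nil => simp [sumE]
  | cons x r ih => simp [List.foldl, ih, sumE_cons]; ring

theorem fitA_loop_ne (budget : Int) (rev sel : List String) (u : Int) (h : sel ≠ []) :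
    fitA_loop budget rev sel u = sel ++ takeW budget rev u := by
  induction rev generalizing sel u with
  | nil => simp [fitA_loop, takeW]
  | cons x r ih =>
    simp only [fitA_loop, takeW]
    by_cases hb : u + estimate_tokens x > budget
    · simp [h, hb]
    · rw [if_neg (by simp [hb]), if_neg (by omega), ih _ _ (by simp)]
      simp

theorem takeW_all (budget : Int) (r : List String) (u : Int) (h : u + sumE r ≤ budget) :
    takeW budget r u = r := by
  induction r generalizing u with
  | nil => rfl
  | cons x t ih =>
    have h1 := sumE_nonneg t
    rw [sumE_cons] at h
    rw [takeW, if_neg (by omega), ih _ (by omega)]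

theorem takeW_append (budget : Int) (r : List String) (x : String) (u : Int)
    (h : u + sumE r + estimate_tokens x > budget) :
    takeW budget (r ++ [x]) u = takeW budget r u := by
  induction r generalizing u with
  | nil =>
    simp only [sumE, List.map_nil, List.sum_nil] at h
    simp [takeW, show u + estimate_tokens x > budget by omega]
  | cons y t ih =>
    rw [sumE_cons] at h
    simp only [List.cons_append, takeW]
    by_cases hb : u + estimate_tokens y > budget
    · simp [hb]
    · rw [if_neg hb, if_neg hb, ih _ (by omega)]

-- A returns the whole list when the total fits
theorem fitA_full (budget : Int) (l : List String) (h : sumE l ≤ budget) :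
    fit_recent l budget = l := by
  unfold fit_recent
  cases hl : l.reverse with
  | nil => simp [List.reverse_eq_nil_iff.mp hl, fitA_loop]
  | cons z r =>
    have hne : l ≠ [] := by
      intro h'; rw [h'] at hl; simp at hl
    have hsum : sumE (z :: r) ≤ budget := by
      rw [← hl, sumE_reverse]; exact h
    rw [sumE_cons] at hsum
    rw [fitA_loop, if_neg (by simp), fitA_loop_ne _ _ _ _ (by simp)]
    rw [takeW_all _ _ _ (by omega)]
    simpa using congrArg List.reverse hl.symm

-- dropping the head when the total exceeds the budget and the tail is nonempty
theorem fitA_drop (budget : Int) (x : String) (rest : List String)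
    (hne : rest ≠ []) (h : sumE (x :: rest) > budget) :
    fit_recent (x :: rest) budget = fit_recent rest budget := by
  unfold fit_recent
  cases hr : rest.reverse with
  | nil => exact absurd (List.reverse_eq_nil_iff.mp hr) hne
  | cons z r =>
    have hrev : (x :: rest).reverse = z :: (r ++ [x]) := by
      simp [List.reverse_cons, hr]
    rw [hrev]
    rw [fitA_loop, if_neg (by simp), fitA_loop_ne _ _ _ _ (by simp)]
    rw [fitA_loop, if_neg (by simp), fitA_loop_ne _ _ _ _ (by simp)]
    have hs : sumE rest = sumE (z :: r) := by rw [← hr, sumE_reverse]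
    rw [sumE_cons] at h hs
    rw [takeW_append _ _ _ _ (by omega)]

theorem main_eq (budget : Int) (l : List String) :
    fit_recent l budget = fit_recent_alt l budget := by
  induction l with
  | nil => rfl
  | cons x rest ih =>
    unfold fit_recent_alt
    rw [foldl_sumE]
    by_cases hfit : sumE (x :: rest) ≤ budget
    · rw [fitA_full _ _ hfit]
      cases rest with
      | nil => rfl
      | cons y t =>
        simp only [fitB_loop]
        rw [if_neg (by omega)]
    · cases hrest : rest with
      | nil =>
        subst hrest
        simp only [fitB_loop]
        unfold fit_recent
        simp [fitA_loop]
      | cons y t =>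
        rw [← hrest]
        rw [fitA_drop _ _ _ (by simp [hrest]) (by omega), ih]
        unfold fit_recent_alt
        rw [foldl_sumE]
        rw [hrest]
        simp only [fitB_loop]
        rw [← hrest, if_pos (by omega), sumE_cons]
        congr 1
        omega

-- ===== VERDICT (by name: the statement is the Claim_ definition above) =====
theorem fit_recent_spec : Claim_equal_fit_recent := by
  intro items budget _
  unfold Spec_fit_recent
  exact main_eq budget items
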